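-- pv_equiv track=rewrite | github.com/PaddlePaddle/PALM | reader/joint_reader.py | joint_input_shape
-- ===== SOURCE A (Python) =====
-- def joint_input_shape(input_shape_list):
--     """
--     joint main task and auxiliary tasks input shape
--     """
--     joint_test_input_shape = input_shape_list[0][1]["backbone"] + input_shape_list[0][1]["task"]
--
--     joint_train_input_shape = [([1, 1], 'int64')] # task_id_shape
--     backbone_input_shape = input_shape_list[0][0]["backbone"]
--     joint_train_input_shape.extend(backbone_input_shape)
--     task_map_id = [(1, len(input_shape_list[0][0]["backbone"]) + 1)]
--
--     for input_shape in input_shape_list: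
--         task_input_shape = input_shape[0]["task"]
--         joint_train_input_shape.extend(task_input_shape)
--         task_map_id.append((task_map_id[-1][1], task_map_id[-1][1] + len(task_input_shape)))
--     return joint_train_input_shape, joint_test_input_shape, task_map_id
-- ===== SOURCE B (Python) =====
-- def joint_input_shape(input_shape_list):
--     """
--     joint main task and auxiliary tasks input shape
--     """
--     head_train, head_test = input_shape_list[0]
--     joint_test_input_shape = head_test["backbone"] + head_test["task"]
--
--     # all segments of the train shape after the task-id slot, in order
--     segments = [head_train["backbone"]] + [inp[0]["task"] for inp in input_shape_list]
--
--     def go(segs, start):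
--         # flatten the segments and produce their (start, end) ranges in one recursion
--         if not segs:
--             return [], []
--         end = start + len(segs[0])
--         flat, ranges = go(segs[1:], end)
--         return segs[0] + flat, [(start, end)] + ranges
--
--     flat, task_map_id = go(segments, 1)
--     joint_train_input_shape = [([1, 1], 'int64')] + flat
--     return joint_train_input_shape, joint_test_input_shape, task_map_id
-- ===== Notes on version B (the rewrite author's own statement) =====
-- stated objective: alternative
-- what changed: collects the backbone and all per-task shape lists into one segment list and a single recursion over it both flattens the segments and emits each (start,end) range by threading the start offset, replacing A's imperative loop that extends the train list and reads task_map_id[-1] to append the next range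
import Mathlib
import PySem

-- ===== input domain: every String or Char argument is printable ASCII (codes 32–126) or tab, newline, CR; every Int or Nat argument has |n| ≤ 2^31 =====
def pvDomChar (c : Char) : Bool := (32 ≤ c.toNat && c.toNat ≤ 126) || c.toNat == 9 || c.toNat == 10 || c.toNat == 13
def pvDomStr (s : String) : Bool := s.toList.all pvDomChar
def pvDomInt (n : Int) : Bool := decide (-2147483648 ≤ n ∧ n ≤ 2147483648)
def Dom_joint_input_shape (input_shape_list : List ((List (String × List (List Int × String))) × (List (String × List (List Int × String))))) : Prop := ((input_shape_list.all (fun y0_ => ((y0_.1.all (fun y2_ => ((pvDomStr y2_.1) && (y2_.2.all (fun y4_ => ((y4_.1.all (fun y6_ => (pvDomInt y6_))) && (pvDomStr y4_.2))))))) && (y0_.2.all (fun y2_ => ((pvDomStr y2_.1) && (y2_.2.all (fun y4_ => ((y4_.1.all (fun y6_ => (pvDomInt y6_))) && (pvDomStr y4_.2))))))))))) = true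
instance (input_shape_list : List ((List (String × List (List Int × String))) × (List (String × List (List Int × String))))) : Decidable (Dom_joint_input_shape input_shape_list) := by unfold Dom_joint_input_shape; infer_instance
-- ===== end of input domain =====

-- B gathers backbone and per-task shapes into one segment list and a single recursion flattens
-- it while emitting each (start,end) range; objective: a genuinely different decomposition, same cost.

-- ===== PORT A =====
-- step for step: index [0], dict lookups (getD: Pre_ guarantees the key is present, so the
-- default is never used inside Pre_), then one loop extending the train shape and appending
-- (last[1], last[1] + len) to task_map_id.
def joint_input_shape (input_shape_list : List ((List (String × List (List Int × String))) × (List (String × List (List Int × String))))) : (List (List Int × String)) × (List (List Int × String)) × (List (Int × Int)) :=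
  let first := (PySem.List.pyGet? input_shape_list 0).getD ([], [])
  let joint_test_input_shape :=
    (PySem.Dict.mk first.2).getD "backbone" [] ++ (PySem.Dict.mk first.2).getD "task" []
  let backbone_input_shape := (PySem.Dict.mk first.1).getD "backbone" []
  let joint_train_input_shape := [([1, 1], "int64")] ++ backbone_input_shape
  let task_map_id : List (Int × Int) := [(1, (backbone_input_shape.length : Int) + 1)]
  let res := input_shape_list.foldl
    (fun (acc : List (List Int × String) × List (Int × Int)) input_shape =>
      let task_input_shape := (PySem.Dict.mk input_shape.1).getD "task" []
      let last := acc.2.getLast?.getD (0, 0)   -- task_map_id[-1]; acc.2 is never empty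
      (acc.1 ++ task_input_shape, acc.2 ++ [(last.2, last.2 + (task_input_shape.length : Int))]))
    (joint_train_input_shape, task_map_id)
  (res.1, joint_test_input_shape, res.2)

-- ===== PORT B =====
-- B's helper recursion: flatten the segments and produce their (start,end) ranges in one pass
def pvGo : List (List (List Int × String)) → Int → (List (List Int × String)) × (List (Int × Int))
  | [], _ => ([], [])
  | seg :: segs, start =>
    let e := start + (seg.length : Int)
    let r := pvGo segs e
    (seg ++ r.1, (start, e) :: r.2)

def joint_input_shape_alt (input_shape_list : List ((List (String × List (List Int × String))) × (List (String × List (List Int × String))))) : (List (List Int × String)) × (List (List Int × String)) × (List (Int × Int)) :=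
  let head := (PySem.List.pyGet? input_shape_list 0).getD ([], [])
  let joint_test_input_shape :=
    (PySem.Dict.mk head.2).getD "backbone" [] ++ (PySem.Dict.mk head.2).getD "task" []
  let segments :=
    [(PySem.Dict.mk head.1).getD "backbone" []]
      ++ input_shape_list.map (fun inp => (PySem.Dict.mk inp.1).getD "task" [])
  let r := pvGo segments 1
  let joint_train_input_shape := [([1, 1], "int64")] ++ r.1
  (joint_train_input_shape, joint_test_input_shape, r.2)

-- ===== PRECONDITION & SPEC =====
-- Pre_ excludes exactly the inputs where Python A raises: IndexError on an empty list, and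
-- KeyError when "backbone"/"task" is missing from the dicts A looks up.
def Pre_joint_input_shape (input_shape_list : List ((List (String × List (List Int × String))) × (List (String × List (List Int × String))))) : Prop :=
  input_shape_list ≠ [] ∧
  (∀ p ∈ input_shape_list.take 1,
    (PySem.Dict.mk p.1).contains "backbone" = true ∧
    (PySem.Dict.mk p.2).contains "backbone" = true ∧
    (PySem.Dict.mk p.2).contains "task" = true) ∧
  (∀ p ∈ input_shape_list, (PySem.Dict.mk p.1).contains "task" = true)
instance (input_shape_list : List ((List (String × List (List Int × String))) × (List (String × List (List Int × String))))) : Decidable (Pre_joint_input_shape input_shape_list) := by unfold Pre_joint_input_shape; infer_instance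
def pvWitness_joint_input_shape : (List ((List (String × List (List Int × String))) × (List (String × List (List Int × String))))) :=
  [([("backbone", [([1, 2], "f")]), ("task", [([3], "g")])],
    [("backbone", [([9], "t")]), ("task", [([8], "u")])])]
def Spec_joint_input_shape (input_shape_list : List ((List (String × List (List Int × String))) × (List (String × List (List Int × String))))) (out : (List (List Int × String)) × (List (List Int × String)) × (List (Int × Int))) : Prop := out = joint_input_shape_alt input_shape_list
instance (input_shape_list : List ((List (String × List (List Int × String))) × (List (String × List (List Int × String))))) (out : (List (List Int × String)) × (List (List Int × String)) × (List (Int × Int))) : Decidable (Spec_joint_input_shape input_shape_list out) := by unfold Spec_joint_input_shape; infer_instance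

-- ===== CLAIM (what is proved, stated in full; the proofs are below) =====
def Claim_equal_joint_input_shape : Prop := ∀ (input_shape_list : List ((List (String × List (List Int × String))) × (List (String × List (List Int × String))))), Dom_joint_input_shape input_shape_list → Pre_joint_input_shape input_shape_list → Spec_joint_input_shape input_shape_list (joint_input_shape input_shape_list)

-- ===== LEMMAS AND PROOFS =====

-- B's recursion in closed form: the flattened segments, and the ranges of their lengths
def pvSteps : Int → List Int → List (Int × Int)
  | _, [] => []
  | b, n :: ns => (b, b + n) :: pvSteps (b + n) ns

theorem pvGo_eq (segs : List (List (List Int × String))) (s : Int) :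
    pvGo segs s = (segs.flatten, pvSteps s (segs.map (fun seg => (seg.length : Int)))) := by
  induction segs generalizing s with
  | nil => simp [pvGo, pvSteps]
  | cons seg segs ih => simp [pvGo, pvSteps, ih]

-- A's loop in closed form, from any train accumulator and a map accumulator ending in (a, b)
theorem pvFoldA (xs : List ((List (String × List (List Int × String))) × (List (String × List (List Int × String))))) (t : List (List Int × String)) (m : List (Int × Int)) (a b : Int) :
    xs.foldl
      (fun (acc : List (List Int × String) × List (Int × Int)) input_shape =>
        (acc.1 ++ (PySem.Dict.mk input_shape.1).getD "task" [],
         acc.2 ++ [((acc.2.getLast?.getD (0, 0)).2,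
                    (acc.2.getLast?.getD (0, 0)).2 + (((PySem.Dict.mk input_shape.1).getD "task" []).length : Int))]))
      (t, m ++ [(a, b)])
    = (t ++ (xs.map (fun inp => (PySem.Dict.mk inp.1).getD "task" [])).flatten,
       m ++ [(a, b)] ++ pvSteps b (xs.map (fun inp => (((PySem.Dict.mk inp.1).getD "task" []).length : Int)))) := by
  induction xs generalizing t m a b with
  | nil => simp [pvSteps]
  | cons x xs ih =>
    have hlast : ((m ++ [(a, b)]).getLast?).getD (0, 0) = (a, b) := by simp
    simp only [List.foldl, List.map, pvSteps, hlast, List.flatten]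
    rw [ih]
    simp [List.append_assoc]

theorem pvFoldA0 (xs : List ((List (String × List (List Int × String))) × (List (String × List (List Int × String))))) (t : List (List Int × String)) (a b : Int) :
    xs.foldl
      (fun (acc : List (List Int × String) × List (Int × Int)) input_shape =>
        (acc.1 ++ (PySem.Dict.mk input_shape.1).getD "task" [],
         acc.2 ++ [((acc.2.getLast?.getD (0, 0)).2,
                    (acc.2.getLast?.getD (0, 0)).2 + (((PySem.Dict.mk input_shape.1).getD "task" []).length : Int))]))
      (t, [(a, b)])
    = (t ++ (xs.map (fun inp => (PySem.Dict.mk inp.1).getD "task" [])).flatten,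
       (a, b) :: pvSteps b (xs.map (fun inp => (((PySem.Dict.mk inp.1).getD "task" []).length : Int)))) := by
  simpa using pvFoldA xs t [] a b

-- ===== VERDICT (by name: the statement is the Claim_ definition above) =====
theorem joint_input_shape_spec : Claim_equal_joint_input_shape := by
  intro l _ _
  unfold Spec_joint_input_shape joint_input_shape joint_input_shape_alt
  simp only []
  rw [pvFoldA0, pvGo_eq]
  simp only [List.map_cons, List.map_map, Function.comp, pvSteps, List.cons_append,
    List.nil_append]
  rw [Int.add_comm 1]
  rfl
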